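-- pv_equiv track=rewrite | github.com/mindspore-ai/models | research/cv/m2det/src/priors.py | reglayer_scale
-- ===== SOURCE A (Python) =====
-- import math
--
-- def reglayer_scale(size, num_layer, size_the):
--     reg_layer_size = []
--     for i in range(num_layer + 1):
--         size = math.ceil(size / 2.)
--         if i >= 2:
--             reg_layer_size += [size]
--             if i == num_layer and size_the != 0:
--                 reg_layer_size += [size - size_the]
--     return reg_layer_size
-- ===== SOURCE B (Python) =====
-- def reglayer_scale(size, num_layer, size_the):
--     # value after j ceil-halvings of size is ceil(size / 2**j) = -((-size) >> j)
--     out = [-(-size >> j) for j in range(3, num_layer + 2)]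
--     if num_layer >= 2 and size_the != 0:
--         out.append(-(-size >> (num_layer + 1)) - size_the)
--     return out
-- ===== Notes on version B (the rewrite author's own statement) =====
-- stated objective: faster
-- what changed: Replaces the stateful running ceil-halving loop (with in-loop index tests) by a per-index closed form: a direct comprehension of ceil(size/2^j) = -((-size)>>j) for j in 3..num_layer+1, with the size_the tail appended once after the loop.
import Mathlib
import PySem

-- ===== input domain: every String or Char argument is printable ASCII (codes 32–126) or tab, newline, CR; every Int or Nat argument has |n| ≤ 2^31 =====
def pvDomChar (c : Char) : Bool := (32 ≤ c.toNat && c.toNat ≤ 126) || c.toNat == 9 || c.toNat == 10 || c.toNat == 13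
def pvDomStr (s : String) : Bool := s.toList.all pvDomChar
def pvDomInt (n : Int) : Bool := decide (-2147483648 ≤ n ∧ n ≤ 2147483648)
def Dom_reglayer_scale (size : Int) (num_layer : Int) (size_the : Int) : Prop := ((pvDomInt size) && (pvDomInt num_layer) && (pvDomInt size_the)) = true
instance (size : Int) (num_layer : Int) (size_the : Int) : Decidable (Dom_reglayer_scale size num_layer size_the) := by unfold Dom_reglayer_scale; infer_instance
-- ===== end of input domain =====

-- B replaces A's running ceil-halving loop by the closed form ceil(size/2^j) per index (objective: idiomatic/alternative).
-- math.ceil(size / 2.) is ported as the exact integer ceiling -((-size) // 2): exact on Dom (|size| ≤ 2^31 < 2^53).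

-- ===== PORT A =====
-- loop body of A: size = ceil(size/2); if i >= 2 append size, and at i == num_layer (size_the != 0) also size - size_the
def pvStepA (num_layer : Int) (size_the : Int) (st : Int × List Int) (i : Int) : Int × List Int :=
  let s := -(PySem.Int.floordiv (-st.1) 2)
  if i ≥ 2 then
    let acc := st.2 ++ [s]
    if i = num_layer ∧ size_the ≠ 0 then (s, acc ++ [s - size_the]) else (s, acc)
  else (s, st.2)

def reglayer_scale (size : Int) (num_layer : Int) (size_the : Int) : List Int :=
  ((PySem.List.pyRange 0 (num_layer + 1) 1).foldl (pvStepA num_layer size_the) (size, [])).2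

-- ===== PORT B =====
-- Python's '(-size) >> j' (j ≥ 0, here j ≥ 3) is floor((-size)/2^j), ported exactly as floordiv (-size) (2^j)
def reglayer_scale_alt (size : Int) (num_layer : Int) (size_the : Int) : List Int :=
  let out := (PySem.List.pyRange 3 (num_layer + 2) 1).map
      (fun j => -(PySem.Int.floordiv (-size) (2 ^ j.toNat)))
  if num_layer ≥ 2 ∧ size_the ≠ 0 then
    out ++ [-(PySem.Int.floordiv (-size) (2 ^ (num_layer + 1).toNat)) - size_the]
  else out

-- ===== PRECONDITION & SPEC =====
def Spec_reglayer_scale (size : Int) (num_layer : Int) (size_the : Int) (out : List Int) : Prop := out = reglayer_scale_alt size num_layer size_the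
instance (size : Int) (num_layer : Int) (size_the : Int) (out : List Int) : Decidable (Spec_reglayer_scale size num_layer size_the out) := by unfold Spec_reglayer_scale; infer_instance

-- ===== CLAIM (what is proved, stated in full; the proofs are below) =====
def Claim_equal_reglayer_scale : Prop := ∀ (size : Int) (num_layer : Int) (size_the : Int), Dom_reglayer_scale size num_layer size_the → Spec_reglayer_scale size num_layer size_the (reglayer_scale size num_layer size_the)

-- ===== LEMMAS AND PROOFS =====

-- one ceil-halving step of the running value equals one more power of two in the closed form
lemma ceil_step (s : Int) (k : Nat) :
    -(PySem.Int.floordiv (-(-(PySem.Int.floordiv (-s) ((2:Int)^k)))) 2)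
      = -(PySem.Int.floordiv (-s) ((2:Int)^(k+1))) := by
  have hk : (0:Int) < 2^k := by positivity
  have hk1 : (0:Int) < 2^(k+1) := by positivity
  set c : Int := -(PySem.Int.floordiv (-s) ((2:Int)^k)) with hcdef
  set q : Int := -(PySem.Int.floordiv (-s) ((2:Int)^(k+1))) with hqdef
  have hc : (c - 1) * 2^k < s ∧ s ≤ c * 2^k :=
    (PySem.Int.neg_floordiv_neg_eq_iff_of_pos hk).mp hcdef.symm
  have hq : (q - 1) * 2^(k+1) < s ∧ s ≤ q * 2^(k+1) :=
    (PySem.Int.neg_floordiv_neg_eq_iff_of_pos hk1).mp hqdef.symm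
  refine (PySem.Int.neg_floordiv_neg_eq_iff_of_pos (b := 2) (by norm_num)).mpr ?_
  constructor
  · have e : ((q - 1) * 2) * 2^k = (q - 1) * 2^(k+1) := by ring
    have h1 : ((q - 1) * 2) * 2^k < c * 2^k := by linarith [hq.1, hc.2]
    exact lt_of_mul_lt_mul_right h1 (le_of_lt hk)
  · have e : (q * 2) * 2^k = q * 2^(k+1) := by ring
    have h2 : (c - 1) * 2^k < (q * 2) * 2^k := by linarith [hc.1, hq.2]
    have := lt_of_mul_lt_mul_right h2 (le_of_lt hk)
    omega

-- invariant of A's loop over range(0, m) for m ≤ num_layer (the tail branch never fires)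
lemma loop_prefix (size num_layer size_the : Int) (m : Nat) (hm : (m:Int) ≤ num_layer) :
    (PySem.List.pyRange 0 (m:Int) 1).foldl (pvStepA num_layer size_the) (size, []) =
      (-(PySem.Int.floordiv (-size) ((2:Int)^m)),
       (PySem.List.pyRange 3 ((m:Int)+1) 1).map
         (fun j => -(PySem.Int.floordiv (-size) ((2:Int) ^ j.toNat)))) := by
  induction m with
  | zero =>
      rw [PySem.List.pyRange_one_eq_nil (by norm_num), PySem.List.pyRange_one_eq_nil (by norm_num)]
      simp [PySem.Int.floordiv]
  | succ m ih =>
      have hm' : (m:Int) ≤ num_layer := by push_cast at hm ⊢; omega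
      have hne : (m:Int) ≠ num_layer := by push_cast at hm; omega
      have hcast : ((m+1 : Nat) : Int) = (m:Int) + 1 := by push_cast; ring
      rw [hcast, PySem.List.pyRange_one_succ_right (by positivity), List.foldl_append, ih hm']
      simp only [List.foldl_cons, List.foldl_nil, pvStepA, hne, ceil_step]
      by_cases h2 : (2:Int) ≤ (m:Int)
      · have h3 : (3:Int) ≤ (m:Int) + 1 := by omega
        rw [show (m:Int) + 1 + 1 = ((m:Int)+1) + 1 by ring,
            PySem.List.pyRange_one_succ_right h3, List.map_append]
        have : ((m:Int) + 1).toNat = m + 1 := by omega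
        simp [h2, this]
      · have hm2 : (m:Int) < 2 := by omega
        rw [PySem.List.pyRange_one_eq_nil (by omega : (m:Int) + 1 ≤ 3),
            PySem.List.pyRange_one_eq_nil (by omega : (m:Int) + 1 + 1 ≤ 3)]
        simp [h2]

-- ===== VERDICT (by name: the statement is the Claim_ definition above) =====
theorem reglayer_scale_spec : Claim_equal_reglayer_scale := by
  intro size num_layer size_the _
  unfold Spec_reglayer_scale reglayer_scale reglayer_scale_alt
  rcases lt_or_ge num_layer 0 with hneg | hpos
  · rw [PySem.List.pyRange_one_eq_nil (by omega), PySem.List.pyRange_one_eq_nil (by omega)]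
    have hcond : ¬ (num_layer ≥ 2 ∧ size_the ≠ 0) := fun h => absurd h.1 (by omega)
    simp [hcond]
  · lift num_layer to ℕ using hpos with N
    rw [PySem.List.pyRange_one_succ_right (by positivity), List.foldl_append,
        loop_prefix size (N:Int) size_the N le_rfl]
    simp only [List.foldl_cons, List.foldl_nil, pvStepA, ceil_step]
    by_cases h2 : (2:Int) ≤ (N:Int)
    · have h3 : (3:Int) ≤ (N:Int) + 1 := by omega
      rw [show (N:Int) + 2 = ((N:Int)+1) + 1 by ring,
          PySem.List.pyRange_one_succ_right h3, List.map_append]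
      have ht : ((N:Int) + 1).toNat = N + 1 := by omega
      by_cases hst : size_the = 0
      · simp [h2, hst, ht]
      · simp [h2, hst, ht]
    · have hN : (N:Int) < 2 := by omega
      rw [PySem.List.pyRange_one_eq_nil (by omega : (N:Int) + 1 ≤ 3),
          PySem.List.pyRange_one_eq_nil (by omega : (N:Int) + 2 ≤ 3)]
      simp [h2]
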